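-- pv_equiv track=rewrite | github.com/elfvvv10/obsidian-track-collaborator | streamlit_app.py | _resolve_preferred_chat_model_name
-- ===== SOURCE A (Python) =====
-- def _resolve_preferred_chat_model_name(model: str, available_models: list[str]) -> str:
--     normalized_model = model.strip()
--     if not normalized_model:
--         return _DEFAULT_ACTIVE_CHAT_MODEL
--     if normalized_model in available_models:
--         return normalized_model
--     if f"{normalized_model}:latest" in available_models:
--         return f"{normalized_model}:latest"
--     for candidate in available_models:
--         if candidate.startswith(f"{normalized_model}-") or candidate.startswith(f"{normalized_model}:"):
--             return candidate
--     return normalized_model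
--
-- _DEFAULT_ACTIVE_CHAT_MODEL = "deepseek"
-- ===== SOURCE B (Python) =====
-- def _resolve_preferred_chat_model_name(model: str, available_models: list[str]) -> str:
--     normalized_model = model.strip()
--     if not normalized_model:
--         return _DEFAULT_ACTIVE_CHAT_MODEL
--     latest = normalized_model + ":latest"
--     exact_found = False
--     latest_found = False
--     first_prefix = None
--     for candidate in available_models:
--         if candidate == normalized_model:
--             exact_found = True
--         if candidate == latest:
--             latest_found = True
--         if first_prefix is None and (
--             candidate.startswith(normalized_model + "-")
--             or candidate.startswith(normalized_model + ":")
--         ):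
--             first_prefix = candidate
--     if exact_found:
--         return normalized_model
--     if latest_found:
--         return latest
--     if first_prefix is not None:
--         return first_prefix
--     return normalized_model
--
-- _DEFAULT_ACTIVE_CHAT_MODEL = "deepseek"
-- ===== Notes on version B (the rewrite author's own statement) =====
-- stated objective: alternative
-- what changed: Replaces A's three separate scans (two membership tests plus a prefix loop with early return) by a single traversal maintaining exact/latest flags and the first prefix match, then decides by priority after the loop.
import Mathlib
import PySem

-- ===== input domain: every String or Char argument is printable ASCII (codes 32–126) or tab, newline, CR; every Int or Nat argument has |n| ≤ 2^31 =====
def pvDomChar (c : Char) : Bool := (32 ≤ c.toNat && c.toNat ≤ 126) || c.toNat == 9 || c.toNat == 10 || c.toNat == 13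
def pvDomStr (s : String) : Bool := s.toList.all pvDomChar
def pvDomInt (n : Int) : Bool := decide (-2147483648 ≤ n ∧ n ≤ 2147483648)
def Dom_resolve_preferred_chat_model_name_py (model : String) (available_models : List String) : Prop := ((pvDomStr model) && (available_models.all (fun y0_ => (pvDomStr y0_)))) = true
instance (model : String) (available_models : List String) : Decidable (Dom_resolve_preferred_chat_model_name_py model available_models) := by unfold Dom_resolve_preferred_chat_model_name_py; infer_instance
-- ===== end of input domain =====

-- B makes one pass over available_models with three pieces of state instead of A's
-- three separate scans; same results, proved equivalent (objective: alternative).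

-- ===== PORT A =====
def resolve_preferred_chat_model_name_py (model : String) (available_models : List String) : String :=
  let normalized_model := PySem.Str.strip model
  if normalized_model = "" then "deepseek"
  else if available_models.contains normalized_model then normalized_model
  else if available_models.contains (normalized_model ++ ":latest") then normalized_model ++ ":latest"
  else
    -- for-loop with early return = first match
    match available_models.find? (fun candidate =>
        PySem.Str.startswith candidate (normalized_model ++ "-") ||
        PySem.Str.startswith candidate (normalized_model ++ ":")) with
    | some candidate => candidate
    | none => normalized_model

-- ===== PORT B =====
def pvAltStep (nm lat : String) (st : Bool × Bool × Option String) (c : String) :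
    Bool × Bool × Option String :=
  ( st.1 || c == nm,
    st.2.1 || c == lat,
    match st.2.2 with
    | some p => some p
    | none =>
        if PySem.Str.startswith c (nm ++ "-") || PySem.Str.startswith c (nm ++ ":") then some c
        else none )

def resolve_preferred_chat_model_name_py_alt (model : String) (available_models : List String) : String :=
  let normalized_model := PySem.Str.strip model
  if normalized_model = "" then "deepseek"
  else
    let lat := normalized_model ++ ":latest"
    let st := available_models.foldl (pvAltStep normalized_model lat) (false, false, none)
    if st.1 then normalized_model
    else if st.2.1 then lat
    else
      match st.2.2 with
      | some p => p
      | none => normalized_model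

-- ===== PRECONDITION & SPEC =====
def Spec_resolve_preferred_chat_model_name_py (model : String) (available_models : List String) (out : String) : Prop := out = resolve_preferred_chat_model_name_py_alt model available_models
instance (model : String) (available_models : List String) (out : String) : Decidable (Spec_resolve_preferred_chat_model_name_py model available_models out) := by unfold Spec_resolve_preferred_chat_model_name_py; infer_instance

-- ===== CLAIM (what is proved, stated in full; the proofs are below) =====
def Claim_equal_resolve_preferred_chat_model_name_py : Prop := ∀ (model : String) (available_models : List String), Dom_resolve_preferred_chat_model_name_py model available_models → Spec_resolve_preferred_chat_model_name_py model available_models (resolve_preferred_chat_model_name_py model available_models)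

-- ===== LEMMAS AND PROOFS =====

/-- The one-pass fold computes exactly the two membership tests and the first prefix match. -/
lemma pvAlt_fold_spec (nm lat : String) (l : List String) (b1 b2 : Bool) (o : Option String) :
    l.foldl (pvAltStep nm lat) (b1, b2, o) =
      ( b1 || l.contains nm,
        b2 || l.contains lat,
        o.or (l.find? (fun c =>
          PySem.Str.startswith c (nm ++ "-") || PySem.Str.startswith c (nm ++ ":"))) ) := by
  induction l generalizing b1 b2 o with
  | nil => simp
  | cons c t ih =>
      simp only [List.foldl_cons, pvAltStep, ih, List.contains_cons, List.find?_cons]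
      refine Prod.ext ?_ (Prod.ext ?_ ?_)
      · simp [Bool.or_assoc, BEq.comm]
      · simp [Bool.or_assoc, BEq.comm]
      · cases o with
        | some p => rfl
        | none =>
            cases hp : (PySem.Chars.startswith c.toList (nm.toList ++ ['-']) ||
                PySem.Chars.startswith c.toList (nm.toList ++ [':'])) <;>
              simp [hp, Option.or]

-- ===== VERDICT (by name: the statement is the Claim_ definition above) =====
theorem resolve_preferred_chat_model_name_py_spec : Claim_equal_resolve_preferred_chat_model_name_py := by
  intro model available_models _
  unfold Spec_resolve_preferred_chat_model_name_py
  unfold resolve_preferred_chat_model_name_py resolve_preferred_chat_model_name_py_alt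
  by_cases h0 : PySem.Str.strip model = ""
  · simp [h0]
  · simp only [pvAlt_fold_spec, Bool.false_or, if_neg h0]
    by_cases h1 : available_models.contains (PySem.Str.strip model) <;>
    by_cases h2 : available_models.contains (PySem.Str.strip model ++ ":latest") <;>
      simp [h1, h2, Option.or]
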